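-- pv_equiv track=rewrite | github.com/mykelbengineer/LeetCode | cyclically-rotating-a-grid/cyclically-rotating-a-grid.py | rotateGrid
-- ===== SOURCE A (Python) =====
-- from typing import List
--
-- def rotateGrid(grid: List[List[int]], k: int) -> List[List[int]]:
--     m, n = len(grid), len(grid[0])
--
--     top, left = 0, 0
--     bottom, right = m - 1, n - 1
--
--     while top < bottom and left < right:
--         element_count = 2 * (bottom - top + 1) + 2 * (right - left + 1) - 4
--         net_rotations = k % element_count
--
--         for _ in range(0, net_rotations):
--             temp = grid[top][left]
--
--             for j in range(left, right):
--                 grid[top][j] = grid[top][j + 1]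
--
--             for i in range(top, bottom):
--                 grid[i][right] = grid[i + 1][right]
--
--             for j in range(right, left, -1):
--                 grid[bottom][j] = grid[bottom][j - 1]
--
--             for i in range(bottom, top, -1):
--                 grid[i][left] = grid[i - 1][left]
--
--             grid[top + 1][left] = temp
--
--         top += 1
--         bottom -= 1
--         left += 1
--         right -= 1
--
--     return grid
-- ===== SOURCE B (Python) =====
-- from typing import List
--
-- def rotateGrid(grid: List[List[int]], k: int) -> List[List[int]]:
--     m, n = len(grid), len(grid[0])
--     for layer in range(min(m, n) // 2):
--         t, l = layer, layer
--         b, r = m - 1 - layer, n - 1 - layer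
--         coords = ([(t, j) for j in range(l, r)]
--                   + [(i, r) for i in range(t, b)]
--                   + [(b, j) for j in range(r, l, -1)]
--                   + [(i, l) for i in range(b, t, -1)])
--         vals = [grid[i][j] for i, j in coords]
--         s = k % len(coords)
--         rotated = vals[s:] + vals[:s]
--         for (i, j), v in zip(coords, rotated):
--             grid[i][j] = v
--     return grid
-- ===== Notes on version B (the rewrite author's own statement) =====
-- stated objective: faster
-- what changed: Instead of performing k%perimeter single-step cyclic shifts per layer (each an O(perimeter) four-loop pass over the mutable grid), B extracts each layer's perimeter into a list once, rotates it by k%len with slicing, and writes it back, so each layer costs O(perimeter).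
-- outside the precondition, e.g. on rotateGrid([[1, 2], [3]], 0): A returns [[1, 2], [3]], B raises IndexError
import Mathlib
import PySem

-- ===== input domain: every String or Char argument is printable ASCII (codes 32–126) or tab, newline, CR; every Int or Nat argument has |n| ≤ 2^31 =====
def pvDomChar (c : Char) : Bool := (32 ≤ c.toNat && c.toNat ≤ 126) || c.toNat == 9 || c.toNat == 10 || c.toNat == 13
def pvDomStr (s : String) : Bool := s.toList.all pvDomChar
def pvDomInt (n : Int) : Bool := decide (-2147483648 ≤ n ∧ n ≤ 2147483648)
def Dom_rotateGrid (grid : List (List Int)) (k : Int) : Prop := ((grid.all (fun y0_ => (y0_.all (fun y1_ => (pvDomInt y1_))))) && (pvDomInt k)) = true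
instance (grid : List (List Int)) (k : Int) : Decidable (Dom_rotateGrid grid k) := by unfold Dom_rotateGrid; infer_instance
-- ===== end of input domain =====

-- B replaces A's repeated one-step layer shifts by a single slice rotation of each
-- layer's perimeter (objective: faster). Both Pythons mutate `grid` in place and
-- return it; the equivalence proved here is about the return value.

-- ===== PORT A =====

-- grid[i][j] (read); total form of Python's indexing: default where Python raises (outside Pre_)
def gget (g : List (List Int)) (i j : Int) : Int :=
  PySem.List.pyGetD (PySem.List.pyGetD g i ([] : List Int)) j 0

-- grid[i][j] = v; no-op where Python raises (outside Pre_)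
def gset (g : List (List Int)) (i j : Int) (v : Int) : List (List Int) :=
  PySem.List.pySetD g i (PySem.List.pySetD (PySem.List.pyGetD g i ([] : List Int)) j v)

-- one iteration of A's inner `for _ in range(0, net_rotations)` body (the four move loops)
def shiftA (t l b r : Int) (g : List (List Int)) : List (List Int) :=
  let temp := gget g t l
  let g1 := (PySem.List.pyRange l r 1).foldl (fun g j => gset g t j (gget g t (j + 1))) g
  let g2 := (PySem.List.pyRange t b 1).foldl (fun g i => gset g i r (gget g (i + 1) r)) g1
  let g3 := (PySem.List.pyRange r l (-1)).foldl (fun g j => gset g b j (gget g b (j - 1))) g2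
  let g4 := (PySem.List.pyRange b t (-1)).foldl (fun g i => gset g i l (gget g (i - 1) l)) g3
  gset g4 (t + 1) l temp

-- the body of A's while loop for one (top,left,bottom,right) frame
def layerA (k t l b r : Int) (g : List (List Int)) : List (List Int) :=
  let element_count := 2 * (b - t + 1) + 2 * (r - l + 1) - 4
  let net_rotations := PySem.Int.mod k element_count
  (PySem.List.pyRange 0 net_rotations 1).foldl (fun g _ => shiftA t l b r g) g

-- A's while loop
def loopA (k t l b r : Int) (g : List (List Int)) : List (List Int) :=
  if t < b ∧ l < r then
    loopA k (t + 1) (l + 1) (b - 1) (r - 1) (layerA k t l b r g)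
  else g
termination_by (b - t).toNat
decreasing_by omega

def rotateGrid (grid : List (List Int)) (k : Int) : List (List Int) :=
  let m : Int := grid.length
  let n : Int := (grid.headD []).length   -- len(grid[0]); Pre_ excludes the empty grid where Python raises
  loopA k 0 0 (m - 1) (n - 1) grid

-- ===== PORT B =====

-- the layer's perimeter coordinates, clockwise from (t, l)
def coordsB (t l b r : Int) : List (Int × Int) :=
  ((PySem.List.pyRange l r 1).map (fun j => (t, j)))
    ++ ((PySem.List.pyRange t b 1).map (fun i => (i, r)))
    ++ ((PySem.List.pyRange r l (-1)).map (fun j => (b, j)))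
    ++ ((PySem.List.pyRange b t (-1)).map (fun i => (i, l)))

-- `for (i, j), v in zip(coords, rotated): grid[i][j] = v`
def writeBack (g : List (List Int)) (cvs : List ((Int × Int) × Int)) : List (List Int) :=
  cvs.foldl (fun g p => gset g p.1.1 p.1.2 p.2) g

-- body of B's `for layer in range(...)`
def layerB (k m n : Int) (g : List (List Int)) (layer : Int) : List (List Int) :=
  let t := layer
  let l := layer
  let b := m - 1 - layer
  let r := n - 1 - layer
  let coords := coordsB t l b r
  let vals := coords.map (fun c => gget g c.1 c.2)
  let s := PySem.Int.mod k (coords.length : Int)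
  let rotated := PySem.List.slice vals (some s) none ++ PySem.List.slice vals none (some s)
  writeBack g (coords.zip rotated)

def rotateGrid_alt (grid : List (List Int)) (k : Int) : List (List Int) :=
  let m : Int := grid.length
  let n : Int := (grid.headD []).length   -- len(grid[0]); Pre_ excludes the empty grid where Python raises
  (PySem.List.pyRange 0 (PySem.Int.floordiv (min m n) 2) 1).foldl (layerB k m n) grid

-- ===== PRECONDITION & SPEC =====
-- Pre_ excludes the empty grid (A raises IndexError on grid[0]) and ragged grids that
-- contain at least one layer, on which A generally raises IndexError (when the layer's
-- net rotation happens to be 0, A touches nothing and returns the grid, while B reads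
-- the perimeter and raises); ragged grids too thin to contain a layer are admitted.
def Pre_rotateGrid (grid : List (List Int)) (k : Int) : Prop :=
  grid ≠ [] ∧
    (grid.length ≤ 1 ∨ (grid.headD []).length ≤ 1 ∨
      ∀ row ∈ grid, row.length = (grid.headD []).length)

instance (grid : List (List Int)) (k : Int) : Decidable (Pre_rotateGrid grid k) := by
  unfold Pre_rotateGrid; infer_instance

def pvWitness_rotateGrid : List (List Int) × Int := ([[1, 2, 3], [4, 5, 6], [7, 8, 9]], 2)

def Spec_rotateGrid (grid : List (List Int)) (k : Int) (out : List (List Int)) : Prop := out = rotateGrid_alt grid k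
instance (grid : List (List Int)) (k : Int) (out : List (List Int)) : Decidable (Spec_rotateGrid grid k out) := by unfold Spec_rotateGrid; infer_instance

-- ===== CLAIM (what is proved, stated in full; the proofs are below) =====
def Claim_equal_rotateGrid : Prop := ∀ (grid : List (List Int)) (k : Int), Dom_rotateGrid grid k → Pre_rotateGrid grid k → Spec_rotateGrid grid k (rotateGrid grid k)

-- ===== LEMMAS AND PROOFS =====

-- ===== generic list helpers =====

theorem pvZipTailAppend {α : Type} (xs ys : List α) :
    (xs ++ ys).zip ((xs ++ ys).tail) = xs.zip (xs.tail ++ ys) ++ ys.zip ys.tail := by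
  induction xs with
  | nil => simp
  | cons a xs ih =>
    cases xs with
    | nil =>
      cases ys with
      | nil => simp
      | cons c ys => simp [List.zip_cons_cons]
    | cons c xs => simpa [List.zip_cons_cons] using ih

theorem pvZipTailCons {α β : Type} (xs : List α) (ys : List β) (w : β) (rest : List β)
    (h : ys.length + 1 = xs.length) :
    xs.zip (ys ++ w :: rest) = xs.zip (ys ++ [w]) := by
  induction xs generalizing ys with
  | nil => simp
  | cons a xs ih =>
    cases ys with
    | nil =>
      cases xs with
      | nil => simp
      | cons c xs => simp at h
    | cons b ys =>
      simp only [List.cons_append, List.zip_cons_cons]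
      simp only [List.length_cons, List.length_cons] at h
      rw [ih ys (by omega)]

theorem pvZipTailSnoc {α β : Type} (xs : List α) (ys : List β) (w : β)
    (h : ys.length + 1 = xs.length) (hx : xs ≠ []) :
    xs.zip (ys ++ [w]) = xs.zip ys ++ [(xs.getLast hx, w)] := by
  induction xs generalizing ys with
  | nil => simp at hx
  | cons a xs ih =>
    cases ys with
    | nil =>
      cases xs with
      | nil => simp
      | cons c xs => simp at h
    | cons b ys =>
      cases xs with
      | nil => simp at h
      | cons c xs =>
        simp only [List.cons_append, List.zip_cons_cons]
        rw [ih ys (by simpa using h) (by simp)]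
        simp [List.getLast]

theorem pvFoldlConst {α β : Type} (F : β → β) (L : List α) (g : β) :
    L.foldl (fun g _ => F g) g = F^[L.length] g := by
  induction L generalizing g with
  | nil => simp
  | cons a L ih => simp [List.foldl_cons, ih, Function.iterate_succ_apply]

theorem pvMapAddOne {α : Type} (a b : Int) (f : Int → α) :
    (PySem.List.pyRange a b 1).map (fun x => f (x + 1)) = (PySem.List.pyRange (a+1) (b+1) 1).map f := by
  rw [PySem.List.pyRange_one a b, PySem.List.pyRange_one (a+1) (b+1)]
  simp only [List.map_map]
  have : ((b+1) - (a+1)).toNat = (b - a).toNat := by omega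
  rw [this]
  apply List.map_congr_left
  intro x _
  simp [Function.comp]
  ring_nf

theorem pvMapSubOne {α : Type} (a b : Int) (f : Int → α) :
    (PySem.List.pyRange a b (-1)).map (fun x => f (x - 1)) = (PySem.List.pyRange (a-1) (b-1) (-1)).map f := by
  rw [PySem.List.pyRange_neg_one a b, PySem.List.pyRange_neg_one (a-1) (b-1)]
  simp only [List.map_map]
  have : ((a-1) - (b-1)).toNat = (a - b).toNat := by omega
  rw [this]
  apply List.map_congr_left
  intro x _
  simp [Function.comp]
  ring_nf

theorem pvTailAppendAsc {α : Type} {a b : Int} (h : a < b) (f : Int → α) :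
    ((PySem.List.pyRange a b 1).map f).tail ++ [f b] = (PySem.List.pyRange a b 1).map (fun x => f (x + 1)) := by
  rw [pvMapAddOne]
  rw [PySem.List.pyRange_one_cons h]
  have h2 : a + 1 ≤ b := by omega
  rw [show (b : Int) + 1 = b + 1 from rfl, PySem.List.pyRange_one_succ_right h2]
  simp

theorem pvTailAppendDesc {α : Type} {a b : Int} (h : b < a) (f : Int → α) :
    ((PySem.List.pyRange a b (-1)).map f).tail ++ [f b] = (PySem.List.pyRange a b (-1)).map (fun x => f (x - 1)) := by
  rw [pvMapSubOne]
  rw [PySem.List.pyRange_neg_one_cons h]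
  have : PySem.List.pyRange (a-1) (b-1) (-1) = PySem.List.pyRange (a-1) b (-1) ++ [b] := by
    rw [PySem.List.pyRange_neg_one_eq_reverse (a-1) (b-1),
        PySem.List.pyRange_neg_one_eq_reverse (a-1) b]
    rw [show (b : Int) - 1 + 1 = b from by ring, PySem.List.pyRange_one_cons (by omega : b < a - 1 + 1)]
    simp
  rw [this]
  simp
-- ===== grid lemmas =====

def RectG (g : List (List Int)) (m n : Nat) : Prop :=
  g.length = m ∧ ∀ row ∈ g, row.length = n

def InBound (m n : Nat) (c : Int × Int) : Prop :=
  0 ≤ c.1 ∧ c.1 < (m : Int) ∧ 0 ≤ c.2 ∧ c.2 < (n : Int)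

theorem gget_eq (g : List (List Int)) {i j : Int} (hi : 0 ≤ i) (hj : 0 ≤ j) :
    gget g i j = ((g[i.toNat]?.getD [])[j.toNat]?).getD 0 := by
  unfold gget
  rw [PySem.List.pyGetD_of_nonneg _ _ hi, PySem.List.pyGetD_of_nonneg _ _ hj,
      List.getD_eq_getElem?_getD, List.getD_eq_getElem?_getD]

theorem gset_eq (g : List (List Int)) {i j : Int} (v : Int) (hi : 0 ≤ i) (hj : 0 ≤ j) :
    gset g i j v = g.set i.toNat ((g[i.toNat]?.getD []).set j.toNat v) := by
  unfold gset
  rw [PySem.List.pyGetD_of_nonneg _ _ hi, PySem.List.pySetD_of_nonneg _ _ hj,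
      PySem.List.pySetD_of_nonneg _ _ hi, List.getD_eq_getElem?_getD]

theorem gset_rect {g : List (List Int)} {m n : Nat} {i j : Int} (v : Int)
    (hi : 0 ≤ i) (hj : 0 ≤ j) (h : RectG g m n) : RectG (gset g i j v) m n := by
  rw [gset_eq g v hi hj]
  obtain ⟨hlen, hrow⟩ := h
  by_cases hc : i.toNat < g.length
  · refine ⟨by simpa using hlen, ?_⟩
    intro row hmem
    rcases List.mem_or_eq_of_mem_set hmem with h' | h'
    · exact hrow row h'
    · subst h'
      rw [List.length_set, List.getElem?_eq_getElem hc]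
      exact hrow _ (List.getElem_mem hc)
  · rw [List.set_eq_of_length_le (by omega)]
    exact ⟨hlen, hrow⟩

theorem gget_gset_ne {g : List (List Int)} {i j i' j' : Int} (v : Int)
    (hi : 0 ≤ i) (hj : 0 ≤ j) (hi' : 0 ≤ i') (hj' : 0 ≤ j')
    (hne : (i, j) ≠ (i', j')) :
    gget (gset g i j v) i' j' = gget g i' j' := by
  rw [gget_eq _ hi' hj', gset_eq g v hi hj, gget_eq _ hi' hj']
  by_cases hii : i = i'
  · subst hii
    have hjne : j ≠ j' := fun hc => hne (by rw [hc])
    have hjj : j.toNat ≠ j'.toNat := by omega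
    rw [List.getElem?_set]
    by_cases hc : i.toNat < g.length
    · simp [hc, List.getElem?_set_ne hjj]
    · simp [hc]
  · have htn : i.toNat ≠ i'.toNat := by omega
    rw [List.getElem?_set_ne htn]

theorem gget_gset_self {g : List (List Int)} {m n : Nat} {i j : Int} (v : Int)
    (h : RectG g m n) (hi : 0 ≤ i) (him : i < (m : Int)) (hj : 0 ≤ j) (hjn : j < (n : Int)) :
    gget (gset g i j v) i j = v := by
  rw [gset_eq g v hi hj, gget_eq _ hi hj]
  obtain ⟨hlen, hrow⟩ := h
  have h1 : i.toNat < g.length := by omega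
  have h2 : j.toNat < (g[i.toNat]?.getD []).length := by
    rw [List.getElem?_eq_getElem h1, Option.getD_some, hrow _ (List.getElem_mem h1)]
    omega
  rw [List.getElem?_set_self h1, Option.getD_some, List.getElem?_set_self h2, Option.getD_some]

-- B's write loop over an arbitrary coordinate/value list

theorem writeBack_cons (g : List (List Int)) (p : (Int × Int) × Int) (cvs : List ((Int × Int) × Int)) :
    writeBack g (p :: cvs) = writeBack (gset g p.1.1 p.1.2 p.2) cvs := rfl

theorem writeBack_append (g : List (List Int)) (u v : List ((Int × Int) × Int)) :
    writeBack g (u ++ v) = writeBack (writeBack g u) v := by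
  unfold writeBack; rw [List.foldl_append]

theorem writeBack_rect {cvs : List ((Int × Int) × Int)} {g : List (List Int)} {m n : Nat}
    (hall : ∀ p ∈ cvs, 0 ≤ p.1.1 ∧ 0 ≤ p.1.2) (h : RectG g m n) :
    RectG (writeBack g cvs) m n := by
  induction cvs generalizing g with
  | nil => exact h
  | cons p cvs ih =>
    have hp := hall p (by simp)
    exact ih (fun q hq => hall q (by simp [hq])) (gset_rect _ hp.1 hp.2 h)

theorem gget_writeBack_notin {cvs : List ((Int × Int) × Int)} {g : List (List Int)}
    {c : Int × Int} (hc1 : 0 ≤ c.1) (hc2 : 0 ≤ c.2)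
    (hall : ∀ p ∈ cvs, 0 ≤ p.1.1 ∧ 0 ≤ p.1.2)
    (hnot : c ∉ cvs.map Prod.fst) :
    gget (writeBack g cvs) c.1 c.2 = gget g c.1 c.2 := by
  induction cvs generalizing g with
  | nil => rfl
  | cons p cvs ih =>
    have hp := hall p (by simp)
    have hne : (p.1.1, p.1.2) ≠ (c.1, c.2) := by
      intro hc; apply hnot
      simp only [List.map_cons, List.mem_cons]
      left
      cases p with | mk c' v => cases c' with | mk a b =>
        cases c with | mk x y => simp_all
    have := ih (g := gset g p.1.1 p.1.2 p.2) (fun q hq => hall q (by simp [hq]))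
      (by intro hmem; exact hnot (by simp only [List.map_cons, List.mem_cons]; right; simpa using hmem))
    rw [writeBack_cons, this, gget_gset_ne _ hp.1 hp.2 hc1 hc2 hne]

theorem map_gget_writeBack {coords : List (Int × Int)} {vs : List Int} {g : List (List Int)}
    {m n : Nat} (h : RectG g m n) (hb : ∀ c ∈ coords, InBound m n c)
    (hnd : coords.Nodup) (hlen : vs.length = coords.length) :
    coords.map (fun c => gget (writeBack g (coords.zip vs)) c.1 c.2) = vs := by
  induction coords generalizing vs g with
  | nil => simp at hlen; simp [hlen]
  | cons c coords ih =>
    cases vs with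
    | nil => simp at hlen
    | cons v vs =>
      have hcb := hb c (by simp)
      have hb' : ∀ c' ∈ coords, InBound m n c' := fun c' hc' => hb c' (by simp [hc'])
      have hnd' := hnd.of_cons
      have hcn : c ∉ coords := by simp [List.nodup_cons] at hnd; exact hnd.1
      simp only [List.zip_cons_cons, writeBack_cons, List.map_cons]
      have hrect' : RectG (gset g c.1 c.2 v) m n := gset_rect _ hcb.1 hcb.2.2.1 h
      refine List.cons_eq_cons.mpr ⟨?_, ?_⟩
      · -- head: value at c after the remaining writes
        rw [gget_writeBack_notin hcb.1 hcb.2.2.1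
              (fun q hq => ⟨(hb q.1 (by simp [List.mem_cons]; right; exact (List.of_mem_zip hq).1)).1,
                            (hb q.1 (by simp [List.mem_cons]; right; exact (List.of_mem_zip hq).1)).2.2.1⟩)
              ?_]
        · exact gget_gset_self _ h hcb.1 hcb.2.1 hcb.2.2.1 hcb.2.2.2
        · intro hmem
          simp only [List.mem_map] at hmem
          obtain ⟨q, hq, hqc⟩ := hmem
          exact hcn (hqc ▸ (List.of_mem_zip hq).1)
      · exact ih hrect' hb' hnd' (by simpa using hlen)
-- ===== evolving-read fold, grid extensionality, overwrite =====

def moveFold (g : List (List Int)) (ps : List ((Int × Int) × (Int × Int))) : List (List Int) :=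
  ps.foldl (fun g p => gset g p.1.1 p.1.2 (gget g p.2.1 p.2.2)) g

theorem moveFold_cons (g : List (List Int)) (p : (Int × Int) × (Int × Int)) (ps : List ((Int × Int) × (Int × Int))) :
    moveFold g (p :: ps) = moveFold (gset g p.1.1 p.1.2 (gget g p.2.1 p.2.2)) ps := rfl

theorem moveFold_append (g : List (List Int)) (u v : List ((Int × Int) × (Int × Int))) :
    moveFold g (u ++ v) = moveFold (moveFold g u) v := by
  unfold moveFold; rw [List.foldl_append]

def NonnegP (p : (Int × Int) × (Int × Int)) : Prop :=
  0 ≤ p.1.1 ∧ 0 ≤ p.1.2 ∧ 0 ≤ p.2.1 ∧ 0 ≤ p.2.2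

-- the evolving reads can be replaced by reads from the initial grid when each
-- source has not been written by an earlier move
theorem moveFold_eq_writeBack {ps : List ((Int × Int) × (Int × Int))} {g : List (List Int)}
    (hall : ∀ p ∈ ps, NonnegP p)
    (hpw : ps.Pairwise (fun p q => q.2 ≠ p.1)) :
    moveFold g ps = writeBack g (ps.map (fun p => (p.1, gget g p.2.1 p.2.2))) := by
  induction ps generalizing g with
  | nil => rfl
  | cons p ps ih =>
    have hp := hall p (by simp)
    rw [moveFold_cons, List.map_cons, writeBack_cons]
    rw [ih (fun q hq => hall q (by simp [hq])) hpw.of_cons]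
    congr 1
    apply List.map_congr_left
    intro q hq
    have hqn := hall q (by simp [hq])
    have hne : (p.1.1, p.1.2) ≠ (q.2.1, q.2.2) := by
      have := (List.pairwise_cons.mp hpw).1 q hq
      intro hc
      apply this
      cases p with | mk pc ps' => cases q with | mk qc qs =>
      cases pc with | mk a b => cases qs with | mk x y => simp_all
    rw [gget_gset_ne _ hp.1 hp.2.1 hqn.2.2.1 hqn.2.2.2 hne]

theorem grid_ext {g₁ g₂ : List (List Int)} {m n : Nat}
    (h1 : RectG g₁ m n) (h2 : RectG g₂ m n)
    (h : ∀ (i j : Nat), i < m → j < n →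
      gget g₁ (i : Int) (j : Int) = gget g₂ (i : Int) (j : Int)) : g₁ = g₂ := by
  obtain ⟨hl1, hr1'⟩ := h1
  obtain ⟨hl2, hr2'⟩ := h2
  apply List.ext_getElem (by rw [hl1, hl2])
  intro a h₁ h₂
  have ha : a < m := by omega
  have hr1 : g₁[a].length = n := hr1' _ (List.getElem_mem h₁)
  have hr2 : g₂[a].length = n := hr2' _ (List.getElem_mem h₂)
  apply List.ext_getElem (by rw [hr1, hr2])
  intro b hb₁ hb₂
  have hbn : b < n := by omega
  have := h a b ha hbn
  rw [gget_eq _ (by positivity) (by positivity), gget_eq _ (by positivity) (by positivity)] at this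
  simpa [List.getElem?_eq_getElem, h₁, h₂, hb₁, hb₂, Int.toNat_natCast] using this

-- pointwise value of writeBack at the idx-th written coordinate
theorem gget_writeBack_zip {coords : List (Int × Int)} {vs : List Int} {g : List (List Int)}
    {m n : Nat} (h : RectG g m n) (hb : ∀ c ∈ coords, InBound m n c)
    (hnd : coords.Nodup) (hlen : vs.length = coords.length)
    {idx : Nat} (hidx : idx < coords.length) :
    gget (writeBack g (coords.zip vs)) coords[idx].1 coords[idx].2 = vs[idx]'(by omega) := by
  have hm := map_gget_writeBack h hb hnd hlen
  have := congrArg (fun l => l[idx]?) hm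
  simp only [List.getElem?_map] at this
  rw [List.getElem?_eq_getElem hidx] at this
  rw [List.getElem?_eq_getElem (by omega : idx < vs.length)] at this
  simpa using this

theorem writeBack_writeBack {coords : List (Int × Int)} {u w : List Int} {g : List (List Int)}
    {m n : Nat} (h : RectG g m n) (hb : ∀ c ∈ coords, InBound m n c)
    (hnd : coords.Nodup) (hw : w.length = coords.length) :
    writeBack (writeBack g (coords.zip u)) (coords.zip w) = writeBack g (coords.zip w) := by
  have hall : ∀ q ∈ coords.zip u, 0 ≤ q.1.1 ∧ 0 ≤ q.1.2 := fun q hq =>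
    ⟨(hb q.1 (List.of_mem_zip hq).1).1, (hb q.1 (List.of_mem_zip hq).1).2.2.1⟩
  have hallw : ∀ q ∈ coords.zip w, 0 ≤ q.1.1 ∧ 0 ≤ q.1.2 := fun q hq =>
    ⟨(hb q.1 (List.of_mem_zip hq).1).1, (hb q.1 (List.of_mem_zip hq).1).2.2.1⟩
  have h1 : RectG (writeBack g (coords.zip u)) m n := writeBack_rect hall h
  apply grid_ext (writeBack_rect hallw h1) (writeBack_rect hallw h)
  intro i j hi hj
  by_cases hc : ((i : Int), (j : Int)) ∈ coords
  · obtain ⟨idx, hidx, hceq⟩ := List.getElem_of_mem hc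
    have e1 := gget_writeBack_zip h1 hb hnd hw (idx := idx) hidx
    have e2 := gget_writeBack_zip h hb hnd hw (idx := idx) hidx
    rw [hceq] at e1 e2
    simp only at e1 e2
    rw [e1, e2]
  · have hfst : ∀ (vv : List Int), ((i:Int),(j:Int)) ∉ (coords.zip vv).map Prod.fst := by
      intro vv hmem
      simp only [List.mem_map] at hmem
      obtain ⟨q, hq, hqc⟩ := hmem
      exact hc (hqc ▸ (List.of_mem_zip hq).1)
    rw [gget_writeBack_notin (by positivity) (by positivity) hallw (hfst w),
        gget_writeBack_notin (by positivity) (by positivity) hallw (hfst w),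
        gget_writeBack_notin (by positivity) (by positivity) hall (hfst u)]

theorem writeBack_self {coords : List (Int × Int)} {g : List (List Int)}
    {m n : Nat} (h : RectG g m n) (hb : ∀ c ∈ coords, InBound m n c)
    (hnd : coords.Nodup) :
    writeBack g (coords.zip (coords.map (fun c => gget g c.1 c.2))) = g := by
  have hall : ∀ q ∈ coords.zip (coords.map (fun c => gget g c.1 c.2)), 0 ≤ q.1.1 ∧ 0 ≤ q.1.2 := fun q hq =>
    ⟨(hb q.1 (List.of_mem_zip hq).1).1, (hb q.1 (List.of_mem_zip hq).1).2.2.1⟩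
  apply grid_ext (writeBack_rect hall h) h
  intro i j hi hj
  by_cases hc : ((i : Int), (j : Int)) ∈ coords
  · obtain ⟨idx, hidx, hceq⟩ := List.getElem_of_mem hc
    have e1 := gget_writeBack_zip (vs := coords.map (fun c => gget g c.1 c.2)) h hb hnd (List.length_map _) (idx := idx) hidx
    simp only [List.getElem_map] at e1
    rw [hceq] at e1
    simpa using e1
  · have hfst : ((i:Int),(j:Int)) ∉ (coords.zip (coords.map (fun c => gget g c.1 c.2))).map Prod.fst := by
      intro hmem
      simp only [List.mem_map] at hmem
      obtain ⟨q, hq, hqc⟩ := hmem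
      exact hc (hqc ▸ (List.of_mem_zip hq).1)
    rw [gget_writeBack_notin (by positivity) (by positivity) hall hfst]
-- ===== the perimeter coordinate list =====

theorem pvRangeDescSnoc {a b : Int} (h : b < a) :
    PySem.List.pyRange a b (-1) = PySem.List.pyRange a (b+1) (-1) ++ [b+1] := by
  rw [PySem.List.pyRange_neg_one_eq_reverse a b,
      PySem.List.pyRange_one_cons (by omega : b + 1 < a + 1),
      PySem.List.pyRange_neg_one_eq_reverse a (b+1)]
  simp

theorem pvPairwiseZipTail {α : Type} {l : List α} (h : l.Nodup) :
    (l.zip l.tail).Pairwise (fun p q => q.2 ≠ p.1) := by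
  induction l with
  | nil => simp
  | cons a tl ih =>
    cases tl with
    | nil => simp
    | cons c tl' =>
      simp only [List.tail_cons, List.zip_cons_cons]
      refine List.pairwise_cons.mpr ⟨?_, ?_⟩
      · intro q hq
        have hq2 : q.2 ∈ tl' := (List.of_mem_zip hq).2
        have : q.2 ∈ c :: tl' := List.mem_cons_of_mem _ hq2
        intro hc
        rw [hc] at this
        exact (List.nodup_cons.mp h).1 this
      · exact ih h.of_cons
    
theorem coords_cons {t l b r : Int} (hlr : l < r) :
    coordsB t l b r = (t, l) ::
      (((PySem.List.pyRange (l+1) r 1).map (fun j => (t, j)))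
        ++ ((PySem.List.pyRange t b 1).map (fun i => (i, r)))
        ++ ((PySem.List.pyRange r l (-1)).map (fun j => (b, j)))
        ++ ((PySem.List.pyRange b t (-1)).map (fun i => (i, l)))) := by
  unfold coordsB
  rw [PySem.List.pyRange_one_cons hlr]
  simp [List.append_assoc]

theorem coords_ne_nil {t l b r : Int} (hlr : l < r) : coordsB t l b r ≠ [] := by
  rw [coords_cons hlr]; simp

theorem coords_length {t l b r : Int} (htb : t < b) (hlr : l < r) :
    ((coordsB t l b r).length : Int) = 2 * (b - t) + 2 * (r - l) := by
  unfold coordsB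
  simp [PySem.List.length_pyRange_one, PySem.List.length_pyRange_neg_one]
  omega

theorem coords_mem_bound {t l b r : Int} {m n : Nat}
    (ht : 0 ≤ t) (hl : 0 ≤ l) (htb : t < b) (hlr : l < r)
    (hbm : b < (m : Int)) (hrn : r < (n : Int)) :
    ∀ c ∈ coordsB t l b r, InBound m n c := by
  intro c hc
  unfold coordsB at hc
  simp only [List.mem_append, List.mem_map, PySem.List.mem_pyRange_one,
    PySem.List.mem_pyRange_neg_one] at hc
  unfold InBound
  rcases hc with ((⟨j, hj, rfl⟩ | ⟨i, hi, rfl⟩) | ⟨j, hj, rfl⟩) | ⟨i, hi, rfl⟩ <;>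
    refine ⟨?_, ?_, ?_, ?_⟩ <;> dsimp only <;> omega

theorem coords_nodup {t l b r : Int} (htb : t < b) (hlr : l < r) :
    (coordsB t l b r).Nodup := by
  have hinj1 : ∀ x : Int, Function.Injective (fun j : Int => (x, j)) := by
    intro x j j' h; simpa using h
  have hinj2 : ∀ x : Int, Function.Injective (fun i : Int => (i, x)) := by
    intro x i i' h; simpa using h
  have nd3 : (PySem.List.pyRange r l (-1)).Nodup := by
    rw [PySem.List.pyRange_neg_one_eq_reverse]
    exact List.nodup_reverse.mpr (PySem.List.nodup_pyRange_one _ _)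
  have nd4 : (PySem.List.pyRange b t (-1)).Nodup := by
    rw [PySem.List.pyRange_neg_one_eq_reverse]
    exact List.nodup_reverse.mpr (PySem.List.nodup_pyRange_one _ _)
  have n1 : ((PySem.List.pyRange l r 1).map (fun j => ((t:Int), j))).Nodup :=
    (PySem.List.nodup_pyRange_one _ _).map (hinj1 t)
  have n2 : ((PySem.List.pyRange t b 1).map (fun i => (i, (r:Int)))).Nodup :=
    (PySem.List.nodup_pyRange_one _ _).map (hinj2 r)
  have n3' : ((PySem.List.pyRange r l (-1)).map (fun j => ((b:Int), j))).Nodup := nd3.map (hinj1 b)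
  have n4' : ((PySem.List.pyRange b t (-1)).map (fun i => (i, (l:Int)))).Nodup := nd4.map (hinj2 l)
  unfold coordsB
  simp only [List.append_assoc]
  rw [List.nodup_append, List.nodup_append, List.nodup_append]
  refine ⟨n1, ⟨n2, ⟨n3', n4', ?_⟩, ?_⟩, ?_⟩
  · -- S3 vs S4
    intro a ha c hc
    simp only [List.mem_map, PySem.List.mem_pyRange_neg_one] at ha hc
    obtain ⟨j, hj, rfl⟩ := ha; obtain ⟨i, hi, rfl⟩ := hc
    simp only [ne_eq, Prod.mk.injEq, not_and]
    intro _; omega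
  · -- S2 vs S3 ++ S4
    intro a ha c hc
    simp only [List.mem_map, List.mem_append, PySem.List.mem_pyRange_one,
      PySem.List.mem_pyRange_neg_one] at ha hc
    obtain ⟨i, hi, rfl⟩ := ha
    rcases hc with ⟨j, hj, rfl⟩ | ⟨i', hi', rfl⟩ <;>
      · simp only [ne_eq, Prod.mk.injEq, not_and]; intro _; omega
  · -- S1 vs S2 ++ S3 ++ S4
    intro a ha c hc
    simp only [List.mem_map, List.mem_append, PySem.List.mem_pyRange_one,
      PySem.List.mem_pyRange_neg_one] at ha hc
    obtain ⟨j, hj, rfl⟩ := ha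
    rcases hc with ⟨i, hi, rfl⟩ | ⟨j', hj', rfl⟩ | ⟨i', hi', rfl⟩ <;>
      · simp only [ne_eq, Prod.mk.injEq, not_and]; intro _; omega
-- ===== segment identities =====

theorem pvSegAsc {α : Type} {a c : Int} (h : a < c) (f : Int → α) (rest : List α) :
    ((PySem.List.pyRange a c 1).map f).zip ((((PySem.List.pyRange a c 1).map f).tail) ++ (f c :: rest)) =
      (PySem.List.pyRange a c 1).map (fun x => (f x, f (x + 1))) := by
  have hlen : (((PySem.List.pyRange a c 1).map f).tail).length + 1 = ((PySem.List.pyRange a c 1).map f).length := by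
    rw [List.length_tail, List.length_map, PySem.List.length_pyRange_one]
    omega
  rw [pvZipTailCons _ _ _ _ hlen, pvTailAppendAsc h f, List.zip_map']

theorem pvSegDesc {α : Type} {a c : Int} (h : c < a) (f : Int → α) (rest : List α) :
    ((PySem.List.pyRange a c (-1)).map f).zip ((((PySem.List.pyRange a c (-1)).map f).tail) ++ (f c :: rest)) =
      (PySem.List.pyRange a c (-1)).map (fun x => (f x, f (x - 1))) := by
  have hlen : (((PySem.List.pyRange a c (-1)).map f).tail).length + 1 = ((PySem.List.pyRange a c (-1)).map f).length := by
    rw [List.length_tail, List.length_map, PySem.List.length_pyRange_neg_one]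
    omega
  rw [pvZipTailCons _ _ _ _ hlen, pvTailAppendDesc h f, List.zip_map']

theorem pvSegSnoc {α : Type} {a c : Int} (h : c < a) (f : Int → α) :
    (PySem.List.pyRange a c (-1)).map (fun x => (f x, f (x - 1))) =
      (((PySem.List.pyRange a c (-1)).map f).zip (((PySem.List.pyRange a c (-1)).map f).tail))
        ++ [(f (c + 1), f c)] := by
  have hlen : (((PySem.List.pyRange a c (-1)).map f).tail).length + 1 = ((PySem.List.pyRange a c (-1)).map f).length := by
    rw [List.length_tail, List.length_map, PySem.List.length_pyRange_neg_one]
    omega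
  have hne : ((PySem.List.pyRange a c (-1)).map f) ≠ [] := by
    intro hc
    have := congrArg List.length hc
    rw [List.length_map, PySem.List.length_pyRange_neg_one] at this
    simp at this
    omega
  have hlast : ((PySem.List.pyRange a c (-1)).map f).getLast hne = f (c + 1) := by
    have hdec : (PySem.List.pyRange a c (-1)).map f
        = ((PySem.List.pyRange a (c+1) (-1)).map f) ++ [f (c+1)] := by
      rw [pvRangeDescSnoc h]
      simp
    simp only [hdec, List.getLast_concat]
  rw [← List.zip_map', ← pvTailAppendDesc h f, pvZipTailSnoc _ _ _ hlen hne, hlast]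

theorem coords_zip_tail {t l b r : Int} (htb : t < b) (hlr : l < r) :
    (coordsB t l b r).zip (coordsB t l b r).tail =
      ((PySem.List.pyRange l r 1).map (fun j => (((t:Int), j), (t, j + 1))))
        ++ (((PySem.List.pyRange t b 1).map (fun i => ((i, r), (i + 1, r))))
        ++ (((PySem.List.pyRange r l (-1)).map (fun j => ((b, j), (b, j - 1))))
        ++ ((((PySem.List.pyRange b t (-1)).map (fun i => (i, l))).zip
              (((PySem.List.pyRange b t (-1)).map (fun i => (i, l))).tail))))) := by
  have hC : coordsB t l b r =
      ((PySem.List.pyRange l r 1).map (fun j => ((t:Int), j)))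
        ++ (((PySem.List.pyRange t b 1).map (fun i => (i, (r:Int))))
        ++ (((PySem.List.pyRange r l (-1)).map (fun j => ((b:Int), j)))
        ++ ((PySem.List.pyRange b t (-1)).map (fun i => (i, (l:Int)))))) := by
    unfold coordsB; simp [List.append_assoc]
  rw [hC, pvZipTailAppend, pvZipTailAppend, pvZipTailAppend]
  congr 1
  · -- first segment
    have h2 : ((PySem.List.pyRange t b 1).map (fun i => (i, (r:Int))))
        ++ (((PySem.List.pyRange r l (-1)).map (fun j => ((b:Int), j)))
        ++ ((PySem.List.pyRange b t (-1)).map (fun i => (i, (l:Int)))))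
        = ((fun j => ((t:Int), j)) r) :: (((PySem.List.pyRange (t+1) b 1).map (fun i => (i, (r:Int))))
            ++ (((PySem.List.pyRange r l (-1)).map (fun j => ((b:Int), j)))
            ++ ((PySem.List.pyRange b t (-1)).map (fun i => (i, (l:Int)))))) := by
      rw [PySem.List.pyRange_one_cons htb]; simp
    rw [h2, pvSegAsc hlr]
  congr 1
  · -- second segment
    have h3 : ((PySem.List.pyRange r l (-1)).map (fun j => ((b:Int), j)))
        ++ ((PySem.List.pyRange b t (-1)).map (fun i => (i, (l:Int))))
        = ((fun i => (i, (r:Int))) b) :: (((PySem.List.pyRange (r-1) l (-1)).map (fun j => ((b:Int), j)))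
            ++ ((PySem.List.pyRange b t (-1)).map (fun i => (i, (l:Int))))) := by
      rw [PySem.List.pyRange_neg_one_cons hlr]; simp
    rw [h3, pvSegAsc htb]
  congr 1
  · -- third segment
    have h4 : ((PySem.List.pyRange b t (-1)).map (fun i => (i, (l:Int))))
        = ((fun j => ((b:Int), j)) l) :: ((PySem.List.pyRange (b-1) t (-1)).map (fun i => (i, (l:Int)))) := by
      rw [PySem.List.pyRange_neg_one_cons htb]; simp
    rw [h4, pvSegDesc hlr]
-- ===== one shift = write back the perimeter rotated by one =====

theorem gset_gset_same {g : List (List Int)} {i j : Int} (x y : Int) (hi : 0 ≤ i) (hj : 0 ≤ j) :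
    gset (gset g i j x) i j y = gset g i j y := by
  rw [gset_eq g x hi hj, gset_eq _ y hi hj, gset_eq g y hi hj]
  by_cases hc : i.toNat < g.length
  · rw [List.getElem?_set_self hc, Option.getD_some, List.set_set, List.set_set]
  · have e : g.set i.toNat ((g[i.toNat]?.getD []).set j.toNat x) = g :=
      List.set_eq_of_length_le (by omega)
    rw [e]

theorem mf1 (g : List (List Int)) (t l r : Int) :
    (PySem.List.pyRange l r 1).foldl (fun g j => gset g t j (gget g t (j + 1))) g
      = moveFold g ((PySem.List.pyRange l r 1).map (fun j => ((t, j), (t, j + 1)))) := by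
  rw [moveFold, List.foldl_map]

theorem mf2 (g : List (List Int)) (t b r : Int) :
    (PySem.List.pyRange t b 1).foldl (fun g i => gset g i r (gget g (i + 1) r)) g
      = moveFold g ((PySem.List.pyRange t b 1).map (fun i => ((i, r), (i + 1, r)))) := by
  rw [moveFold, List.foldl_map]

theorem mf3 (g : List (List Int)) (b l r : Int) :
    (PySem.List.pyRange r l (-1)).foldl (fun g j => gset g b j (gget g b (j - 1))) g
      = moveFold g ((PySem.List.pyRange r l (-1)).map (fun j => ((b, j), (b, j - 1)))) := by
  rw [moveFold, List.foldl_map]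

theorem mf4 (g : List (List Int)) (t b l : Int) :
    (PySem.List.pyRange b t (-1)).foldl (fun g i => gset g i l (gget g (i - 1) l)) g
      = moveFold g ((PySem.List.pyRange b t (-1)).map (fun i => ((i, l), (i - 1, l)))) := by
  rw [moveFold, List.foldl_map]

theorem coords_getLast {t l b r : Int} (htb : t < b) (h : coordsB t l b r ≠ []) :
    (coordsB t l b r).getLast h = (t + 1, l) := by
  have hdec : coordsB t l b r =
      (((PySem.List.pyRange l r 1).map (fun j => ((t:Int), j)))
        ++ (((PySem.List.pyRange t b 1).map (fun i => (i, (r:Int))))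
        ++ (((PySem.List.pyRange r l (-1)).map (fun j => ((b:Int), j)))
        ++ ((PySem.List.pyRange b (t+1) (-1)).map (fun i => (i, (l:Int)))))))
        ++ [((t:Int) + 1, (l:Int))] := by
    unfold coordsB
    rw [pvRangeDescSnoc htb]
    simp [List.append_assoc]
  simp only [hdec, List.getLast_concat]

theorem shiftA_eq {g : List (List Int)} {m n : Nat} {t l b r : Int}
    (ht : 0 ≤ t) (hl : 0 ≤ l) (htb : t < b) (hlr : l < r)
    (hbm : b < (m : Int)) (hrn : r < (n : Int)) :
    shiftA t l b r g =
      writeBack g ((coordsB t l b r).zip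
        (((coordsB t l b r).map (fun c => gget g c.1 c.2)).rotate 1)) := by
  have hC := coords_zip_tail htb hlr
  have hnd := coords_nodup htb hlr
  have hbnd := coords_mem_bound ht hl htb hlr hbm hrn (m := m) (n := n)
  -- 1. shiftA as a single moveFold plus the final write of temp
  have e1 : shiftA t l b r g =
      gset (moveFold g
        (((PySem.List.pyRange l r 1).map (fun j => (((t:Int), j), (t, j + 1))))
          ++ (((PySem.List.pyRange t b 1).map (fun i => ((i, r), (i + 1, r))))
          ++ (((PySem.List.pyRange r l (-1)).map (fun j => ((b, j), (b, j - 1))))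
          ++ ((PySem.List.pyRange b t (-1)).map (fun i => ((i, l), (i - 1, l)))))))) (t + 1) l (gget g t l) := by
    simp only [shiftA]
    rw [mf1, mf2, mf3, mf4, ← moveFold_append, ← moveFold_append, ← moveFold_append]
  rw [e1]
  -- 2. split off the final (dead) move of the fourth loop
  rw [show ((PySem.List.pyRange b t (-1)).map (fun i => ((i, (l:Int)), (i - 1, l))))
        = ((((PySem.List.pyRange b t (-1)).map (fun i => (i, (l:Int)))).zip
            (((PySem.List.pyRange b t (-1)).map (fun i => (i, (l:Int)))).tail))
          ++ [(((t:Int) + 1, (l:Int)), ((t:Int), (l:Int)))]) from by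
      have := pvSegSnoc htb (fun i : Int => (i, (l:Int)))
      simpa using this]
  rw [show ∀ (X Y Z W : List ((Int × Int) × (Int × Int))) (p : (Int × Int) × (Int × Int)),
        X ++ (Y ++ (Z ++ (W ++ [p]))) = (X ++ (Y ++ (Z ++ W))) ++ [p] from by
      intro X Y Z W p; simp [List.append_assoc]]
  rw [moveFold_append]
  rw [show ∀ (G : List (List Int)), moveFold G [(((t:Int) + 1, (l:Int)), ((t:Int), (l:Int)))]
        = gset G (t+1) l (gget G t l) from fun G => rfl]
  rw [gset_gset_same _ _ (by omega) hl]
  -- 3. the remaining moves are exactly the consecutive pairs of the perimeter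
  rw [← hC]
  rw [moveFold_eq_writeBack
        (fun p hp => ⟨(hbnd p.1 (List.of_mem_zip hp).1).1, (hbnd p.1 (List.of_mem_zip hp).1).2.2.1,
                      (hbnd p.2 (List.mem_of_mem_tail (List.of_mem_zip hp).2)).1,
                      (hbnd p.2 (List.mem_of_mem_tail (List.of_mem_zip hp).2)).2.2.1⟩)
        (pvPairwiseZipTail hnd)]
  -- 4. fixed values: map over the zip = zip with mapped tail
  rw [show (fun p : (Int × Int) × (Int × Int) => (p.1, gget g p.2.1 p.2.2))
        = Prod.map (id : Int × Int → Int × Int) (fun c : Int × Int => gget g c.1 c.2) from by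
      funext p; cases p; rfl]
  rw [← List.zip_map_right]
  -- 5. assemble into a single writeBack and identify the rotated value list
  rw [show ∀ (G : List (List Int)) (cvs : List ((Int × Int) × Int)) (a bq v : Int),
        gset (writeBack G cvs) a bq v = writeBack G (cvs ++ [((a, bq), v)]) from by
      intro G cvs a bq v; rw [writeBack_append]; rfl]
  congr 1
  -- remaining: C.zip (C.tail.map f) ++ [((t+1,l), gget g t l)] = C.zip ((C.map f).rotate 1)
  have hcons := coords_cons (t := t) (b := b) hlr
  have hlen1 : ((coordsB t l b r).tail.map (fun c : Int × Int => gget g c.1 c.2)).length + 1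
      = (coordsB t l b r).length := by
    rw [List.length_map, List.length_tail]
    rw [hcons]; simp
  have hne := coords_ne_nil (t := t) (b := b) hlr
  have hrot : ((coordsB t l b r).map (fun c : Int × Int => gget g c.1 c.2)).rotate 1
      = (coordsB t l b r).tail.map (fun c : Int × Int => gget g c.1 c.2) ++ [gget g t l] := by
    rw [List.rotate_eq_drop_append_take (by rw [List.length_map, hcons]; simp)]
    rw [hcons]; simp
  rw [hrot, pvZipTailSnoc _ _ (gget g t l) hlen1 hne, coords_getLast htb hne]
-- ===== iterating the shift, one layer, the whole loop =====

theorem iter_shift {g : List (List Int)} {m n : Nat} {t l b r : Int}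
    (ht : 0 ≤ t) (hl : 0 ≤ l) (htb : t < b) (hlr : l < r)
    (hbm : b < (m : Int)) (hrn : r < (n : Int)) (hg : RectG g m n) (cnt : Nat) :
    (shiftA t l b r)^[cnt] g =
      writeBack g ((coordsB t l b r).zip
        (((coordsB t l b r).map (fun c => gget g c.1 c.2)).rotate cnt)) := by
  have hbnd := coords_mem_bound ht hl htb hlr hbm hrn (m := m) (n := n)
  have hnd := coords_nodup htb hlr
  induction cnt with
  | zero =>
    simp only [Function.iterate_zero, id_eq, List.rotate_zero]
    exact (writeBack_self hg hbnd hnd).symm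
  | succ cnt ih =>
    rw [Function.iterate_succ_apply', ih]
    have hall : ∀ q ∈ (coordsB t l b r).zip
        (((coordsB t l b r).map (fun c => gget g c.1 c.2)).rotate cnt), 0 ≤ q.1.1 ∧ 0 ≤ q.1.2 :=
      fun q hq => ⟨(hbnd q.1 (List.of_mem_zip hq).1).1, (hbnd q.1 (List.of_mem_zip hq).1).2.2.1⟩
    have hg' : RectG (writeBack g ((coordsB t l b r).zip
        (((coordsB t l b r).map (fun c => gget g c.1 c.2)).rotate cnt))) m n :=
      writeBack_rect hall hg
    rw [shiftA_eq ht hl htb hlr hbm hrn]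
    have hvals : (coordsB t l b r).map (fun c => gget (writeBack g ((coordsB t l b r).zip
        (((coordsB t l b r).map (fun c => gget g c.1 c.2)).rotate cnt))) c.1 c.2)
        = ((coordsB t l b r).map (fun c => gget g c.1 c.2)).rotate cnt :=
      map_gget_writeBack hg hbnd hnd (by rw [List.length_rotate, List.length_map])
    rw [hvals, List.rotate_rotate]
    exact writeBack_writeBack hg hbnd hnd (by rw [List.length_rotate, List.length_map])

theorem layer_eq {g : List (List Int)} {m n : Nat} {k p : Int}
    (hp : 0 ≤ p) (hpb : p < (m : Int) - 1 - p) (hpr : p < (n : Int) - 1 - p)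
    (hg : RectG g m n) :
    layerA k p p ((m : Int) - 1 - p) ((n : Int) - 1 - p) g = layerB k (m : Int) (n : Int) g p := by
  have htb : p < (m : Int) - 1 - p := hpb
  have hlr : p < (n : Int) - 1 - p := hpr
  have hbm : (m : Int) - 1 - p < (m : Int) := by omega
  have hrn : (n : Int) - 1 - p < (n : Int) := by omega
  have hec : (0 : Int) < 2 * ((m : Int) - 1 - p - p + 1) + 2 * ((n : Int) - 1 - p - p + 1) - 4 := by
    omega
  have hlenc : (((coordsB p p ((m : Int) - 1 - p) ((n : Int) - 1 - p)).length : Int))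
      = 2 * ((m : Int) - 1 - p - p + 1) + 2 * ((n : Int) - 1 - p - p + 1) - 4 := by
    rw [coords_length htb hlr]; ring
  simp only [layerA, layerB]
  rw [hlenc, pvFoldlConst, PySem.List.length_pyRange_one, iter_shift hp hp htb hlr hbm hrn hg]
  have hmn : 0 ≤ PySem.Int.mod k (2 * ((m : Int) - 1 - p - p + 1) + 2 * ((n : Int) - 1 - p - p + 1) - 4) :=
    PySem.Int.mod_nonneg _ hec
  have hml : PySem.Int.mod k (2 * ((m : Int) - 1 - p - p + 1) + 2 * ((n : Int) - 1 - p - p + 1) - 4)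
      < 2 * ((m : Int) - 1 - p - p + 1) + 2 * ((n : Int) - 1 - p - p + 1) - 4 :=
    PySem.Int.mod_lt _ hec
  rw [PySem.List.slice_from _ hmn, PySem.List.slice_to _ hmn]
  simp only [Int.sub_zero]
  rw [List.rotate_eq_drop_append_take
    (by rw [List.length_map]; have := coords_length htb hlr; omega)]

theorem layerB_rect {g : List (List Int)} {m n : Nat} {k p : Int}
    (hp : 0 ≤ p) (hpb : p < (m : Int) - 1 - p) (hpr : p < (n : Int) - 1 - p)
    (hg : RectG g m n) : RectG (layerB k (m : Int) (n : Int) g p) m n := by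
  have hbnd := coords_mem_bound hp hp hpb hpr (by omega : (m:Int) - 1 - p < (m:Int))
    (by omega : (n:Int) - 1 - p < (n:Int)) (m := m) (n := n)
  simp only [layerB]
  exact writeBack_rect
    (fun q hq => ⟨(hbnd q.1 (List.of_mem_zip hq).1).1, (hbnd q.1 (List.of_mem_zip hq).1).2.2.1⟩) hg

theorem loop_eq {m n : Nat} (k : Int) (L : Int)
    (hL : L = PySem.Int.floordiv (min (m : Int) (n : Int)) 2) :
    ∀ (fuel : Nat) (p : Int) (g : List (List Int)), (L - p).toNat ≤ fuel → 0 ≤ p → RectG g m n →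
    loopA k p p ((m : Int) - 1 - p) ((n : Int) - 1 - p) g
      = (PySem.List.pyRange p L 1).foldl (layerB k (m : Int) (n : Int)) g := by
  have hL' : L = min (m : Int) (n : Int) / 2 := by
    rw [hL, PySem.Int.floordiv_eq_ediv_of_pos (by norm_num)]
  intro fuel
  induction fuel with
  | zero =>
    intro p g hfuel hp hg
    have hpL : L ≤ p := by omega
    rw [loopA]
    rw [if_neg (by omega), PySem.List.pyRange_one_eq_nil hpL]
    rfl
  | succ fuel ih =>
    intro p g hfuel hp hg
    by_cases hc : p < L
    · have hpb : p < (m : Int) - 1 - p := by omega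
      have hpr : p < (n : Int) - 1 - p := by omega
      rw [loopA, if_pos ⟨hpb, hpr⟩]
      rw [layer_eq hp hpb hpr hg]
      have e1 : (m : Int) - 1 - p - 1 = (m : Int) - 1 - (p + 1) := by ring
      have e2 : (n : Int) - 1 - p - 1 = (n : Int) - 1 - (p + 1) := by ring
      rw [e1, e2, ih (p + 1) _ (by omega) (by omega) (layerB_rect hp hpb hpr hg)]
      rw [PySem.List.pyRange_one_cons hc, List.foldl_cons]
    · have hpL : L ≤ p := by omega
      rw [loopA]
      rw [if_neg (by omega), PySem.List.pyRange_one_eq_nil hpL]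
      rfl

-- ===== VERDICT (by name: the statement is the Claim_ definition above) =====
theorem rotateGrid_spec : Claim_equal_rotateGrid := by
  intro grid k _hdom hpre
  obtain ⟨hne, hshape⟩ := hpre
  show rotateGrid grid k = rotateGrid_alt grid k
  simp only [rotateGrid, rotateGrid_alt]
  by_cases hdeg : grid.length ≤ 1 ∨ (grid.headD []).length ≤ 1
  · -- no layer: A's while-condition is false, B's range is empty
    rw [loopA, if_neg (by omega)]
    rw [PySem.List.pyRange_one_eq_nil
      (by rw [PySem.Int.floordiv_eq_ediv_of_pos (by norm_num)]; omega)]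
    rfl
  · have hrow : ∀ row ∈ grid, row.length = (grid.headD []).length := by tauto
    have hg : RectG grid grid.length (grid.headD []).length := ⟨rfl, hrow⟩
    have e1 : (grid.length : Int) - 1 = (grid.length : Int) - 1 - 0 := by ring
    have e2 : ((grid.headD []).length : Int) - 1 = ((grid.headD []).length : Int) - 1 - 0 := by ring
    rw [e1, e2]
    exact loop_eq k _ rfl
      ((PySem.Int.floordiv (min ((grid.length : Int)) (((grid.headD []).length : Int))) 2).toNat)
      0 grid (by omega) le_rfl hg
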